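-- pv_equiv track=rewrite | github.com/fluke9/medc17-checksum-tool | main.py | build_crc_transformation_matrix
-- ===== SOURCE A (Python) =====
-- def crc32_process_dword_bitwise(initial_crc: int, dword_input: int) -> int:
--     """Process a single dword through CRC32 bit-by-bit algorithm."""
--     crc = initial_crc
--     dword = dword_input
--     for _ in range(32):
--         xor_result = dword ^ crc
--         dword >>= 1
--         if (xor_result & 1) != 0:
--             crc = (crc >> 1) ^ 0xEDB88320
--         else:
--             crc = crc >> 1
--     return crc
--
-- def build_crc_transformation_matrix(intermediate_crc: int) -> list:
--     """
--     Build 32x32 transformation matrix for CRC32 operation in GF(2).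
--
--     Shows how each bit of input dword affects output CRC.
--     Returns list of 32 integers (rows as bitmasks).
--     """
--     baseline = crc32_process_dword_bitwise(intermediate_crc, 0)
--     matrix = []
--
--     for output_bit in range(32):
--         row_value = 0
--         for input_bit in range(32):
--             test_dword = 1 << input_bit
--             result = crc32_process_dword_bitwise(intermediate_crc, test_dword)
--             effect = result ^ baseline
--             if (effect >> output_bit) & 1:
--                 row_value |= (1 << input_bit)
--         matrix.append(row_value)
--
--     return matrix
-- ===== SOURCE B (Python) =====
-- def crc32_process_dword_bitwise(initial_crc: int, dword_input: int) -> int: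
--     """Process a single dword through CRC32 bit-by-bit algorithm."""
--     crc = initial_crc
--     dword = dword_input
--     for _ in range(32):
--         xor_result = dword ^ crc
--         dword >>= 1
--         if (xor_result & 1) != 0:
--             crc = (crc >> 1) ^ 0xEDB88320
--         else:
--             crc = crc >> 1
--     return crc
--
-- def build_crc_transformation_matrix(intermediate_crc: int) -> list:
--     # Column-major assembly: one CRC computation per input bit (33 total instead
--     # of 1025), scattering each column's effect bits into the 32 rows at once.
--     baseline = crc32_process_dword_bitwise(intermediate_crc, 0)
--     rows = [0] * 32
--     for input_bit in range(32):
--         effect = crc32_process_dword_bitwise(intermediate_crc, 1 << input_bit) ^ baseline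
--         bit = 1 << input_bit
--         rows = [r | bit if (effect >> ob) & 1 else r for ob, r in enumerate(rows)]
--     return rows
-- ===== Notes on version B (the rewrite author's own statement) =====
-- stated objective: faster
-- what changed: B traverses the matrix column-major: it computes each input bit's CRC effect once (33 CRC evaluations instead of 1025) and scatters its bits into all 32 rows, instead of A's row-major nested loops that recompute the CRC for every (row, column) pair.
import Mathlib
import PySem

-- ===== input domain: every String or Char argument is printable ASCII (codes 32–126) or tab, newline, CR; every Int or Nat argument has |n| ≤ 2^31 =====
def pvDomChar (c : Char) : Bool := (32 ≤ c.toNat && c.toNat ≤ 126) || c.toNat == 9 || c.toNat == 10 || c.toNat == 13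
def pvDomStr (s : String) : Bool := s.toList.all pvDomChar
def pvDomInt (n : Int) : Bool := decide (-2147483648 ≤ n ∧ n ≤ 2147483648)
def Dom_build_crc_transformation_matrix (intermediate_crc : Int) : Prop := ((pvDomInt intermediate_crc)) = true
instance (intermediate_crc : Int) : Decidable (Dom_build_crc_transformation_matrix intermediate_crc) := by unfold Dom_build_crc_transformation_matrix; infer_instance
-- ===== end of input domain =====

-- B replaces A's row-major nested loops (one 32-step CRC per (row, column) pair)
-- by a column-major pass: one CRC effect per input bit, scattered into all 32 rows.

-- ===== PORT A =====
-- Python's `x >> k` for k ≥ 0 (forces Lean's shift-by-Nat instance; exact)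
def pyShr (a : Int) (k : Nat) : Int := a >>> k

-- shared module-level helper (Source B defines the identical function and both call it)
def crc32_process_dword_bitwise (initial_crc : Int) (dword_input : Int) : Int :=
  ((List.range 32).foldl
    (fun (s : Int × Int) _ =>
      let xor_result := PySem.Int.bxor s.2 s.1
      let dword := s.2 >>> 1
      if PySem.Int.band xor_result 1 ≠ 0 then (PySem.Int.bxor (s.1 >>> 1) 0xEDB88320, dword)
      else (s.1 >>> 1, dword))
    (initial_crc, dword_input)).1

def build_crc_transformation_matrix (intermediate_crc : Int) : List Int :=
  let baseline := crc32_process_dword_bitwise intermediate_crc 0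
  (List.range 32).foldl
    (fun matrix output_bit =>
      let row_value := (List.range 32).foldl
        (fun row_value input_bit =>
          let test_dword : Int := (1 : Int) <<< input_bit
          let result := crc32_process_dword_bitwise intermediate_crc test_dword
          let effect := PySem.Int.bxor result baseline
          if PySem.Int.band (pyShr effect output_bit) 1 ≠ 0 then PySem.Int.bor row_value ((1 : Int) <<< input_bit)
          else row_value)
        0
      matrix ++ [row_value])
    []

-- ===== PORT B =====
def build_crc_transformation_matrix_alt (intermediate_crc : Int) : List Int :=
  let baseline := crc32_process_dword_bitwise intermediate_crc 0
  (List.range 32).foldl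
    (fun rows input_bit =>
      let effect := PySem.Int.bxor (crc32_process_dword_bitwise intermediate_crc ((1 : Int) <<< input_bit)) baseline
      let bit : Int := (1 : Int) <<< input_bit
      -- enumerate indices are ≥ 0 here, so .toNat is exact for Python's `effect >> ob`
      (PySem.List.enumerate rows).map
        (fun p => if PySem.Int.band (pyShr effect p.1.toNat) 1 ≠ 0 then PySem.Int.bor p.2 bit else p.2))
    (List.replicate 32 0)

-- ===== PRECONDITION & SPEC =====
def Spec_build_crc_transformation_matrix (intermediate_crc : Int) (out : List Int) : Prop := out = build_crc_transformation_matrix_alt intermediate_crc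
instance (intermediate_crc : Int) (out : List Int) : Decidable (Spec_build_crc_transformation_matrix intermediate_crc out) := by unfold Spec_build_crc_transformation_matrix; infer_instance

-- ===== CLAIM (what is proved, stated in full; the proofs are below) =====
def Claim_equal_build_crc_transformation_matrix : Prop := ∀ (intermediate_crc : Int), Dom_build_crc_transformation_matrix intermediate_crc → Spec_build_crc_transformation_matrix intermediate_crc (build_crc_transformation_matrix intermediate_crc)

-- ===== LEMMAS AND PROOFS =====

-- the per-cell test both programs make for column i, row ob
def pvEff (ic : Int) (i : Nat) : Int :=
  PySem.Int.bxor (crc32_process_dword_bitwise ic ((1 : Int) <<< i)) (crc32_process_dword_bitwise ic 0)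

-- A's inner loop for a fixed output bit, over an arbitrary column list
def pvRowA (ic : Int) (ob : Nat) (L : List Nat) (r0 : Int) : Int :=
  L.foldl (fun r i => if PySem.Int.band (pyShr (pvEff ic i) ob) 1 ≠ 0 then PySem.Int.bor r ((1 : Int) <<< i) else r) r0

-- B's scatter step for column i
def pvStepB (ic : Int) (i : Nat) (rows : List Int) : List Int :=
  (PySem.List.enumerate rows).map
    (fun p => if PySem.Int.band (pyShr (pvEff ic i) p.1.toNat) 1 ≠ 0 then PySem.Int.bor p.2 ((1 : Int) <<< i) else p.2)

theorem pvStepB_length (ic : Int) (i : Nat) (rows : List Int) :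
    (pvStepB ic i rows).length = rows.length := by
  simp [pvStepB, PySem.List.length_enumerate]

theorem pvStepB_getElem (ic : Int) (i : Nat) (rows : List Int) (k : Nat)
    (hk : k < rows.length) :
    (pvStepB ic i rows)[k]'(by simpa [pvStepB_length] using hk) =
      (if PySem.Int.band (pyShr (pvEff ic i) k) 1 ≠ 0 then PySem.Int.bor (rows[k]) ((1 : Int) <<< i) else rows[k]) := by
  simp [pvStepB, PySem.List.getElem_enumerate]

-- loop interchange: B's fold over columns, read at row k, is A's inner fold for row k
theorem pvFoldB_length (ic : Int) (L : List Nat) (rows : List Int) :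
    (L.foldl (fun rs i => pvStepB ic i rs) rows).length = rows.length := by
  induction L generalizing rows with
  | nil => rfl
  | cons i L ih => simpa [pvStepB_length] using ih (pvStepB ic i rows)

theorem pvFoldB_getElem (ic : Int) (L : List Nat) (rows : List Int) (k : Nat)
    (hk : k < rows.length) :
    (L.foldl (fun rs i => pvStepB ic i rs) rows)[k]'(by simpa [pvFoldB_length] using hk) =
      pvRowA ic k L (rows[k]) := by
  induction L generalizing rows with
  | nil => simp [pvRowA]
  | cons i L ih =>
    have h1 : k < (pvStepB ic i rows).length := by simpa [pvStepB_length] using hk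
    have := ih (pvStepB ic i rows) h1
    simp only [List.foldl_cons]
    rw [this, pvStepB_getElem ic i rows k hk]
    simp [pvRowA]

theorem pv_foldl_append {α β : Type} (f : β → α) (L : List β) (acc : List α) :
    L.foldl (fun m x => m ++ [f x]) acc = acc ++ L.map f := by
  induction L generalizing acc with
  | nil => simp
  | cons x L ih => simp [ih]

-- ===== VERDICT (by name: the statement is the Claim_ definition above) =====
theorem build_crc_transformation_matrix_spec : Claim_equal_build_crc_transformation_matrix := by
  intro ic _
  show build_crc_transformation_matrix ic = build_crc_transformation_matrix_alt ic
  rw [show build_crc_transformation_matrix ic =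
        (List.range 32).foldl (fun m ob => m ++ [pvRowA ic ob (List.range 32) 0]) [] from rfl,
      pv_foldl_append, List.nil_append,
      show build_crc_transformation_matrix_alt ic =
        (List.range 32).foldl (fun rs i => pvStepB ic i rs) (List.replicate 32 0) from rfl]
  apply List.ext_getElem
  · simp [pvFoldB_length]
  · intro k h1 h2
    have hk : k < (List.replicate (32:Nat) (0:Int)).length := by
      simpa [pvFoldB_length] using h2
    have hg := pvFoldB_getElem ic (List.range 32) (List.replicate 32 0) k hk
    simp only [List.getElem_replicate] at hg
    simp only [List.getElem_map, List.getElem_range]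
    exact hg.symm
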